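-- pv_equiv track=rewrite | github.com/frankasd12/NibbleCheck | api/main.py | _pick_overall_status
-- ===== SOURCE A (Python) =====
-- from typing import List, Dict, Any
--
-- STATUS_WEIGHT = {"UNSAFE": 3, "CAUTION": 2, "SAFE": 1}  # worst-case wins
--
-- def _pick_overall_status(items: List[Dict[str, Any]]) -> str:
--     if not items:
--         return "SAFE"
--     w = max(STATUS_WEIGHT.get(i["status"], 1) for i in items)
--     for k, v in STATUS_WEIGHT.items():
--         if v == w:
--             return k
--     return "SAFE"
-- ===== SOURCE B (Python) =====
-- from typing import List, Dict, Any
--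
-- def _pick_overall_status(items: List[Dict[str, Any]]) -> str:
--     statuses = [i["status"] for i in items]
--     if "UNSAFE" in statuses:
--         return "UNSAFE"
--     if "CAUTION" in statuses:
--         return "CAUTION"
--     return "SAFE"
-- ===== Notes on version B (the rewrite author's own statement) =====
-- stated objective: simpler
-- what changed: Replaces the numeric-weight max plus reverse dictionary lookup with a direct precedence check on the collected statuses (UNSAFE, then CAUTION, else SAFE).
import Mathlib
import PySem

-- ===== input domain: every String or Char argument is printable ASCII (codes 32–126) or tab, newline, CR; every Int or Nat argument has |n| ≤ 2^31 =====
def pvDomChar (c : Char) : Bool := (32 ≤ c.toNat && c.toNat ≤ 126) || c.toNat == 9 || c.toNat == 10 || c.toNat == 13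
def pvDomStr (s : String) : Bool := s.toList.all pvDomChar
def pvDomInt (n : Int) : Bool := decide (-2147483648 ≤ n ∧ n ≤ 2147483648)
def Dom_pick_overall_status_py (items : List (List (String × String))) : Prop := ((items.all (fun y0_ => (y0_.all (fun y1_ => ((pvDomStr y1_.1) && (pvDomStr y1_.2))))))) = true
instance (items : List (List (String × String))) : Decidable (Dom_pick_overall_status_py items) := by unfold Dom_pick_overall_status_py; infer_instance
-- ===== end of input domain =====

-- B replaces A's numeric-weight max and reverse dictionary lookup with a direct precedence check over the collected statuses (simpler, same cost).


-- ===== PORT A =====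
def STATUS_WEIGHT : PySem.Dict String Int :=
  PySem.Dict.ofList [("UNSAFE", 3), ("CAUTION", 2), ("SAFE", 1)]

-- i["status"]: first-match lookup on the association list (exact for a Python dict; none = KeyError, excluded by Pre_)
def pyStatus? (i : List (String × String)) : Option String :=
  (i.find? (fun kv => kv.1 == "status")).map (·.2)

-- STATUS_WEIGHT.get(i["status"], 1); the "" default is only reachable outside Pre_
def pyWeight (i : List (String × String)) : Int :=
  PySem.Dict.getD STATUS_WEIGHT ((pyStatus? i).getD "") 1

def pick_overall_status_py (items : List (List (String × String))) : String :=
  if items = [] then "SAFE"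
  else
    -- w = max(STATUS_WEIGHT.get(i["status"], 1) for i in items)
    match PySem.List.max? (items.map pyWeight) (fun w => w) with
    | none => "SAFE"
    | some w =>
      -- for k, v in STATUS_WEIGHT.items(): if v == w: return k; then the fallthrough return "SAFE"
      match STATUS_WEIGHT.items.find? (fun kv => kv.2 == w) with
      | some kv => kv.1
      | none => "SAFE"

-- ===== PORT B =====
def pick_overall_status_py_alt (items : List (List (String × String))) : String :=
  let statuses := items.map (fun i => ((i.find? (fun kv => kv.1 == "status")).map (·.2)).getD "")
  if statuses.contains "UNSAFE" then "UNSAFE"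
  else if statuses.contains "CAUTION" then "CAUTION"
  else "SAFE"

-- ===== PRECONDITION & SPEC =====
-- Pre_ excludes items with no "status" key, on which the Python A (and B) raise KeyError.
def Pre_pick_overall_status_py (items : List (List (String × String))) : Prop :=
  (items.all (fun i => i.any (fun kv => kv.1 == "status"))) = true
instance (items : List (List (String × String))) : Decidable (Pre_pick_overall_status_py items) := by
  unfold Pre_pick_overall_status_py; infer_instance
def pvWitness_pick_overall_status_py : (List (List (String × String))) :=
  [[("status", "CAUTION")], [("status", "SAFE")]]

def Spec_pick_overall_status_py (items : List (List (String × String))) (out : String) : Prop := out = pick_overall_status_py_alt items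
instance (items : List (List (String × String))) (out : String) : Decidable (Spec_pick_overall_status_py items out) := by unfold Spec_pick_overall_status_py; infer_instance

-- ===== CLAIM (what is proved, stated in full; the proofs are below) =====
def Claim_equal_pick_overall_status_py : Prop := ∀ (items : List (List (String × String))), Dom_pick_overall_status_py items → Pre_pick_overall_status_py items → Spec_pick_overall_status_py items (pick_overall_status_py items)

-- ===== LEMMAS AND PROOFS =====

-- the status B extracts from an item ("" only when no "status" key is present)
def pvStat (i : List (String × String)) : String :=
  ((i.find? (fun kv => kv.1 == "status")).map (·.2)).getD ""

theorem pyWeight_eq (i : List (String × String)) :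
    pyWeight i = if pvStat i = "UNSAFE" then 3 else if pvStat i = "CAUTION" then 2 else 1 := by
  have hs : (pyStatus? i).getD "" = pvStat i := rfl
  unfold pyWeight
  rw [hs]
  generalize pvStat i = s
  by_cases h1 : s = "UNSAFE"
  · subst h1; rfl
  · by_cases h2 : s = "CAUTION"
    · subst h2; rfl
    · have e1 : (("UNSAFE" : String) == s) = false := beq_eq_false_iff_ne.mpr (Ne.symm h1)
      have e2 : (("CAUTION" : String) == s) = false := beq_eq_false_iff_ne.mpr (Ne.symm h2)
      by_cases h3 : s = "SAFE"
      · subst h3; rfl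
      · have e3 : (("SAFE" : String) == s) = false := beq_eq_false_iff_ne.mpr (Ne.symm h3)
        simp [STATUS_WEIGHT, PySem.Dict.getD, PySem.Dict.get?, PySem.Dict.ofList,
          PySem.Dict.insert, PySem.Dict.empty, PySem.Dict.update, List.find?_cons, e1, e2, e3, h1, h2]

theorem pyWeight_ge_one (i : List (String × String)) : 1 ≤ pyWeight i := by
  rw [pyWeight_eq]; split_ifs <;> omega

-- the running max of the weights, characterised by which statuses occur
theorem foldl_max_weight (t : List (List (String × String))) (a : Int) (ha : 1 ≤ a) :
    (t.map pyWeight).foldl max a =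
      if (t.map pvStat).contains "UNSAFE" then max a 3
      else if (t.map pvStat).contains "CAUTION" then max a 2
      else a := by
  induction t generalizing a with
  | nil => simp
  | cons i t ih =>
    simp only [List.map_cons, List.foldl_cons, List.contains_cons]
    rw [ih (max a (pyWeight i)) (by have := pyWeight_ge_one i; omega)]
    rw [pyWeight_eq]
    by_cases h1 : pvStat i = "UNSAFE" <;> by_cases h2 : pvStat i = "CAUTION" <;>
      simp [h1, h2, beq_iff_eq] <;> split_ifs <;> first | omega | (exfalso; aesop)

-- ===== VERDICT (by name: the statement is the Claim_ definition above) =====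
theorem pick_overall_status_py_spec : Claim_equal_pick_overall_status_py := by
  intro items _ _
  unfold Spec_pick_overall_status_py pick_overall_status_py pick_overall_status_py_alt
  cases items with
  | nil => rfl
  | cons i t =>
    have halt : (fun i : List (String × String) =>
        ((i.find? (fun kv => kv.1 == "status")).map (·.2)).getD "") = pvStat := rfl
    rw [if_neg (by simp), List.map_cons, PySem.List.max?_id_cons,
        foldl_max_weight t (pyWeight i) (pyWeight_ge_one i), pyWeight_eq, halt]
    by_cases h1 : pvStat i = "UNSAFE" <;> by_cases h2 : pvStat i = "CAUTION" <;>
    by_cases h3 : (t.map pvStat).contains "UNSAFE" <;>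
    by_cases h4 : (t.map pvStat).contains "CAUTION" <;>
      simp only [List.map_cons, List.contains_cons, Bool.or_eq_true, beq_iff_eq, h1, h2, h3, h4,
        false_or, or_true, true_or, if_true, if_false, ite_true, ite_false,
        iff_false, not_false_iff] <;> (try simp [h1, h2, eq_comm]) <;>
      (try simp only [show ("UNSAFE" = pvStat i) ↔ False from ⟨fun h => h1 h.symm, False.elim⟩,
        if_false, ite_false]) <;>
      (try simp only [show ("CAUTION" = pvStat i) ↔ False from ⟨fun h => h2 h.symm, False.elim⟩,
        if_false, ite_false]) <;> decide
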